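-- pv_equiv track=rewrite | github.com/euijaebilly/codingpractice | Nov/22-11-w2_1.py | making_the_string_great
-- ===== SOURCE A (Python) =====
-- def making_the_string_great(s):
--     s = list(s)
--     result = []
--
--     while len(s) != 0:
--         if len(result) == 0:
--             result.append(s.pop(0))
--             if len(s) == 0:
--                 break
--         if (result[len(result)-1].islower() and s[0] == result[len(result)-1].upper()) or (result[len(result)-1].isupper() and s[0] == result[len(result)-1].lower()):
--             result.pop()
--             s.pop(0)
--         else:
--             result.append(s.pop(0))
--
--     return ''.join(result)
-- ===== SOURCE B (Python) =====
-- def making_the_string_great(s):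
--     stack = []
--     for c in s:
--         if stack and stack[-1] != c and stack[-1].lower() == c.lower():
--             stack.pop()
--         else:
--             stack.append(c)
--     return ''.join(stack)
-- ===== Notes on version B (the rewrite author's own statement) =====
-- stated objective: faster
-- what changed: Replaced the while-loop that repeatedly pops from the front of a list (each pop(0) is O(n)) and re-tests the stack top with a single forward for-loop maintaining a stack, the case-pair test rewritten as unequal characters whose lowercased forms are equal.
import Mathlib
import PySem

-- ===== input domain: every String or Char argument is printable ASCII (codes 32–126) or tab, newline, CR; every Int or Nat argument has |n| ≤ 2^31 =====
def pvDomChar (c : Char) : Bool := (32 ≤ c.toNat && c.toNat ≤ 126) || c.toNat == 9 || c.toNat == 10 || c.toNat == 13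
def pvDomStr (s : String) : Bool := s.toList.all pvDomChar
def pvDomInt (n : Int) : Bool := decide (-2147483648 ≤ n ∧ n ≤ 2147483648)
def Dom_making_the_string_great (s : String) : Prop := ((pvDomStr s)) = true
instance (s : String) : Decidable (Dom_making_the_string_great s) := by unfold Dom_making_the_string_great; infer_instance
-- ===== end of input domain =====

-- B replaces A's front-popping while-loop (quadratic) by one forward pass with a stack: faster (asymptotic).

-- ===== PORT A =====
-- literal transliteration of A's while-loop: s is consumed from the front, result appended/popped at the back
def mtgLoopA (s result : List Char) : List Char :=
  match s with
  | [] => result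
  | c :: rest =>
    if result.isEmpty then
      -- result.append(s.pop(0)); if len(s) == 0: break
      match rest with
      | [] => result ++ [c]
      | d :: rest' =>
        let res := result ++ [c]
        if (PySem.Chars.islower res.getLast! && (d == PySem.Chars.upperChar res.getLast!)) ||
           (PySem.Chars.isupper res.getLast! && (d == PySem.Chars.lowerChar res.getLast!)) then
          mtgLoopA rest' res.dropLast
        else
          mtgLoopA rest' (res ++ [d])
    else
      if (PySem.Chars.islower result.getLast! && (c == PySem.Chars.upperChar result.getLast!)) ||
         (PySem.Chars.isupper result.getLast! && (c == PySem.Chars.lowerChar result.getLast!)) then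
        mtgLoopA rest result.dropLast
      else
        mtgLoopA rest (result ++ [c])
termination_by s.length

def making_the_string_great (s : String) : String := String.ofList (mtgLoopA s.toList [])

-- ===== PORT B =====
-- one fold step; stack kept head-first (head = top), reversed at the end
def mtgStep (st : List Char) (c : Char) : List Char :=
  match st with
  | t :: rest =>
    if (!(t == c)) && (PySem.Chars.lowerChar t == PySem.Chars.lowerChar c) then rest
    else c :: t :: rest
  | [] => [c]

def making_the_string_great_alt (s : String) : String :=
  String.ofList (s.toList.foldl mtgStep []).reverse

-- ===== PRECONDITION & SPEC =====
def Spec_making_the_string_great (s : String) (out : String) : Prop := out = making_the_string_great_alt s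
instance (s : String) (out : String) : Decidable (Spec_making_the_string_great s out) := by unfold Spec_making_the_string_great; infer_instance

-- ===== CLAIM (what is proved, stated in full; the proofs are below) =====
def Claim_equal_making_the_string_great : Prop := ∀ (s : String), Dom_making_the_string_great s → Spec_making_the_string_great s (making_the_string_great s)

-- ===== LEMMAS AND PROOFS =====

theorem char_eq_iff (a b : Char) : (a = b) ↔ a.toNat = b.toNat :=
  ⟨fun h => by rw [h], fun h => by
    have h2 := congrArg Char.ofNat h
    rwa [Char.ofNat_toNat, Char.ofNat_toNat] at h2⟩

theorem char_le_iff (a b : Char) : (a ≤ b) ↔ a.toNat ≤ b.toNat := Iff.rfl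

theorem mtg_cond_eq (t d : Char) :
    ((PySem.Chars.islower t && (d == PySem.Chars.upperChar t)) ||
     (PySem.Chars.isupper t && (d == PySem.Chars.lowerChar t)))
    = ((!(t == d)) && (PySem.Chars.lowerChar t == PySem.Chars.lowerChar d)) := by
  rw [Bool.eq_iff_iff]
  simp only [PySem.Chars.islower, PySem.Chars.isupper, PySem.Chars.lowerChar, PySem.Chars.upperChar,
    Bool.and_eq_true, Bool.or_eq_true, Bool.not_eq_eq_eq_not, Bool.not_true, beq_iff_eq,
    beq_eq_false_iff_ne, ne_eq, decide_eq_true_eq, char_le_iff, char_eq_iff]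
  have ha : ('a':Char).toNat = 97 := rfl
  have hz : ('z':Char).toNat = 122 := rfl
  have hA : ('A':Char).toNat = 65 := rfl
  have hZ : ('Z':Char).toNat = 90 := rfl
  rw [ha, hz, hA, hZ]
  have hvt : t.toNat < 55296 ∨ (57344 ≤ t.toNat ∧ t.toNat < 1114112) := by
    have h := t.valid; unfold UInt32.isValidChar Nat.isValidChar at h; exact h
  have hvd : d.toNat < 55296 ∨ (57344 ≤ d.toNat ∧ d.toNat < 1114112) := by
    have h := d.valid; unfold UInt32.isValidChar Nat.isValidChar at h; exact h
  by_cases h1 : 65 ≤ t.toNat ∧ t.toNat ≤ 90 <;> by_cases h2 : 65 ≤ d.toNat ∧ d.toNat ≤ 90 <;>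
    simp only [h1, h2, if_pos, and_true, true_and, false_and] <;>
    split_ifs <;>
    (try simp only [Char.toNat_ofNat, Nat.isValidChar]) <;> (try split_ifs) <;> (try contradiction) <;> (try simp only [or_false]) <;> (try omega)

theorem mtgLoopA_eq_fold (s res : List Char) :
    mtgLoopA s res = (s.foldl mtgStep res.reverse).reverse := by
  induction s, res using mtgLoopA.induct with
  | case1 res => simp [mtgLoopA]
  | case2 res c hres =>
    rw [List.isEmpty_iff.mp hres]
    simp [mtgLoopA, mtgStep]
  | case3 res c hres d rest' resv hcond ih =>
    have h0 : res = [] := List.isEmpty_iff.mp hres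
    subst h0
    simp only [resv, List.nil_append] at hcond ih ⊢
    rw [mtg_cond_eq] at hcond
    simp only [List.getLast!_eq_getLast?_getD, List.getLast?_singleton, Char.reduceDefault,
      Option.getD_some] at hcond
    simp only [mtgLoopA, List.isEmpty_nil, if_true, List.nil_append,
      List.getLast!_eq_getLast?_getD, List.getLast?_singleton, Char.reduceDefault,
      Option.getD_some, mtg_cond_eq, List.foldl, mtgStep, List.reverse_nil]
    rw [if_pos hcond, if_pos hcond, List.dropLast_singleton]
    simpa using ih
  | case4 res c hres d rest' resv hcond ih =>
    have h0 : res = [] := List.isEmpty_iff.mp hres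
    subst h0
    simp only [resv, List.nil_append] at hcond ih ⊢
    rw [mtg_cond_eq] at hcond
    simp only [List.getLast!_eq_getLast?_getD, List.getLast?_singleton, Char.reduceDefault,
      Option.getD_some] at hcond
    simp only [mtgLoopA, List.isEmpty_nil, if_true, List.nil_append,
      List.getLast!_eq_getLast?_getD, List.getLast?_singleton, Char.reduceDefault,
      Option.getD_some, mtg_cond_eq, List.foldl, mtgStep, List.reverse_nil]
    rw [if_neg hcond, if_neg hcond]
    simpa using ih
  | case5 res c rest hres hcond ih =>
    rcases hr : res.reverse with _ | ⟨t, rr⟩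
    · rw [List.reverse_eq_nil_iff] at hr; simp [hr] at hres
    · have hres' : res = rr.reverse ++ [t] := by
        rw [← List.reverse_reverse res, hr]; simp
      have hgl : res.getLast! = t := by rw [hres']; simp
      have hdl : res.dropLast = rr.reverse := by rw [hres']; exact List.dropLast_concat
      rw [mtg_cond_eq, hgl] at hcond
      simp only [Bool.not_eq_true] at hres
      rw [List.foldl_cons]
      simp only [mtgStep, hcond, if_true]
      have hrr : res.dropLast.reverse = rr := by rw [hdl, List.reverse_reverse]
      rw [mtgLoopA.eq_def]
      simp only [hres, Bool.false_eq_true, if_false, mtg_cond_eq, hgl, hcond, if_true]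
      rw [ih, hrr]
  | case6 res c rest hres hcond ih =>
    rcases hr : res.reverse with _ | ⟨t, rr⟩
    · rw [List.reverse_eq_nil_iff] at hr; simp [hr] at hres
    · have hres' : res = rr.reverse ++ [t] := by
        rw [← List.reverse_reverse res, hr]; simp
      have hgl : res.getLast! = t := by rw [hres']; simp
      have hdl : res.dropLast = rr.reverse := by rw [hres']; exact List.dropLast_concat
      rw [mtg_cond_eq, hgl] at hcond
      simp only [Bool.not_eq_true] at hres hcond
      rw [List.foldl_cons]
      simp only [mtgStep, hcond, Bool.false_eq_true, if_false]
      rw [mtgLoopA.eq_def]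
      simp only [hres, Bool.false_eq_true, if_false, mtg_cond_eq, hgl, hcond]
      rw [ih]
      have : (res ++ [c]).reverse = c :: t :: rr := by rw [hres']; simp
      rw [this]

-- ===== VERDICT (by name: the statement is the Claim_ definition above) =====
theorem making_the_string_great_spec : Claim_equal_making_the_string_great := by
  intro s _
  show _ = _
  simp [making_the_string_great, making_the_string_great_alt, mtgLoopA_eq_fold]
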